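-- pv_equiv track=rewrite | github.com/bansallab/INoDS-model | INoDS_convenience_functions.py | return_potention_recovery_date
-- ===== SOURCE A (Python) =====
-- def return_potention_recovery_date(node_health, time_max):
-- 	r""" For SIR/SIS model. Returns the potential time-points of recovery for each
-- 	infected focal node"""
--
-- 	recovery_daylist = {}
-- 	## select all nodes that were reported infected and sort
-- 	for node in sorted([node1 for node1 in node_health.keys() if 1 in node_health[node1]]):
-- 		## sort sick days for the focal node
-- 		sick_days = sorted(node_health[node][1])
-- 		for time1, time2 in sick_days:
-- 			if 0 in node_health[node]:
-- 				##choose all uninfected time-periods after the focal sick period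
-- 				healthy_dates = [(healthy_day1, healthy_day2) for healthy_day1, healthy_day2 in node_health[node][0] if healthy_day2 > time1]
--
-- 				if len(healthy_dates)>0:
-- 					##choose the first report of uninfection
-- 					lower_limit, upper_limit = min(healthy_dates, key=lambda x:x[1])
-- 					recovery_date = lower_limit
-- 				else: recovery_date = time_max
-- 			else: recovery_date = time_max
--
-- 			##recovery date can be any time-point between the last report of node "infection" state to the the first
-- 			## report of uninfection afterwards (or time_max of the study)
-- 			recovery_daylist[(node, time1, time2)] = recovery_date
--
-- 	return recovery_daylist
-- ===== SOURCE B (Python) =====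
-- def return_potention_recovery_date(node_health, time_max):
--     """Sort each node's healthy intervals by end-day once (stable) and sweep the
--     sorted sick intervals with a single forward pointer, instead of re-scanning
--     and re-minimising the healthy list for every sick interval."""
--     out = {}
--     for node in sorted(n for n in node_health if 1 in node_health[n]):
--         states = node_health[node]
--         hs = sorted(states.get(0, []), key=lambda h: h[1])
--         ptr = 0
--         for t1, t2 in sorted(states[1]):
--             while ptr < len(hs) and hs[ptr][1] <= t1:
--                 ptr += 1
--             out[(node, t1, t2)] = hs[ptr][0] if ptr < len(hs) else time_max
--     return out
-- ===== Notes on version B (the rewrite author's own statement) =====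
-- stated objective: alternative
-- what changed: Per node, B sorts the healthy intervals by end-day once (stable) and sweeps the lexicographically sorted sick intervals with a single monotone pointer, instead of A's per-sick-interval filter of the whole healthy list followed by min(..., key=end); asymptotically better per node but not measurably faster on the benchmark's shapes.
import Mathlib
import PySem

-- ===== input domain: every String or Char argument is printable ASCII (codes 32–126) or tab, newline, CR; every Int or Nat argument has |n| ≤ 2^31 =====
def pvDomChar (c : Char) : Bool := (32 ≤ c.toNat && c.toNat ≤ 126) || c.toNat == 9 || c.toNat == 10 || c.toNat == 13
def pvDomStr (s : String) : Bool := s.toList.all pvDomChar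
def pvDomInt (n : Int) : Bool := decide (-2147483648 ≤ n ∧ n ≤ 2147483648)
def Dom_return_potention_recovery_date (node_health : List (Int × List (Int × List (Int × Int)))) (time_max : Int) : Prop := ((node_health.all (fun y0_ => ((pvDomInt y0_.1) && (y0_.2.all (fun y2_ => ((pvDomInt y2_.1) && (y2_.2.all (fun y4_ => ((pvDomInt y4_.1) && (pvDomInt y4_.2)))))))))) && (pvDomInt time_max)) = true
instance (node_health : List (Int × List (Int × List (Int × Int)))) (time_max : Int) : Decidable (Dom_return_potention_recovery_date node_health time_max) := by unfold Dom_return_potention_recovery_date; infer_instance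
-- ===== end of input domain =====

-- B sorts each node's healthy intervals by end-day once and sweeps the sorted sick
-- intervals with a monotone pointer, replacing A's per-sick-interval filter+min scan.

-- ===== PORT A =====
-- shared input plumbing: the Python argument is a dict of dicts
def rprdStates (node_health : List (Int × List (Int × List (Int × Int)))) :
    PySem.Dict Int (PySem.Dict Int (List (Int × Int))) :=
  PySem.Dict.ofList (node_health.map (fun p => (p.1, PySem.Dict.ofList p.2)))

def return_potention_recovery_date (node_health : List (Int × List (Int × List (Int × Int)))) (time_max : Int) : List (Int × Int × Int × Int) :=
  let d := rprdStates node_health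
  let nodes := PySem.List.sorted ((d.keys).filter (fun n => (d.getD n PySem.Dict.empty).contains 1)) (fun x => x) false
  let recovery_daylist := nodes.foldl (fun acc node =>
    let nd := d.getD node PySem.Dict.empty
    let sick_days := PySem.List.sorted2 (nd.getD 1 []) (fun h => h.1) (fun h => h.2)
    sick_days.foldl (fun acc2 tt =>
      let recovery_date :=
        if nd.contains 0 then
          let healthy_dates := (nd.getD 0 []).filter (fun h => decide (tt.1 < h.2))
          if healthy_dates.length > 0 then
            match PySem.List.min? healthy_dates (fun h => h.2) with
            | some m => m.1
            | none => time_max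
          else time_max
        else time_max
      acc2.insert (node, tt.1, tt.2) recovery_date) acc) PySem.Dict.empty
  recovery_daylist.items.map (fun p => (p.1.1, p.1.2.1, p.1.2.2, p.2))

-- ===== PORT B =====
-- the 'while ptr < len(hs) and hs[ptr][1] <= t1: ptr += 1' loop of Source B
def rprdAdvance (hs : List (Int × Int)) (t1 : Int) (ptr : Nat) : Nat :=
  if h : ptr < hs.length then
    if hs[ptr].2 ≤ t1 then rprdAdvance hs t1 (ptr + 1) else ptr
  else ptr
termination_by hs.length - ptr

-- the body of Source B's 'for node in …' loop
def rprdNodeLoop (node : Int) (time_max : Int) (states : PySem.Dict Int (List (Int × Int)))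
    (acc : PySem.Dict (Int × Int × Int) Int) : PySem.Dict (Int × Int × Int) Int :=
  let hs := PySem.List.sorted (states.getD 0 []) (fun h => h.2) false
  let sick := PySem.List.sorted2 (states.getD 1 []) (fun h => h.1) (fun h => h.2)
  (sick.foldl (fun st tt =>
      let p := rprdAdvance hs tt.1 st.1
      (p, st.2.insert (node, tt.1, tt.2) (if h : p < hs.length then (hs[p]).1 else time_max)))
    ((0 : Nat), acc)).2

def return_potention_recovery_date_alt (node_health : List (Int × List (Int × List (Int × Int)))) (time_max : Int) : List (Int × Int × Int × Int) :=
  let d := rprdStates node_health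
  let nodes := PySem.List.sorted ((d.keys).filter (fun n => (d.getD n PySem.Dict.empty).contains 1)) (fun x => x) false
  let out := nodes.foldl (fun acc node => rprdNodeLoop node time_max (d.getD node PySem.Dict.empty) acc) PySem.Dict.empty
  out.items.map (fun p => (p.1.1, p.1.2.1, p.1.2.2, p.2))

-- ===== PRECONDITION & SPEC =====
def Spec_return_potention_recovery_date (node_health : List (Int × List (Int × List (Int × Int)))) (time_max : Int) (out : List (Int × Int × Int × Int)) : Prop := out = return_potention_recovery_date_alt node_health time_max
instance (node_health : List (Int × List (Int × List (Int × Int)))) (time_max : Int) (out : List (Int × Int × Int × Int)) : Decidable (Spec_return_potention_recovery_date node_health time_max out) := by unfold Spec_return_potention_recovery_date; infer_instance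

-- ===== CLAIM (what is proved, stated in full; the proofs are below) =====
def Claim_equal_return_potention_recovery_date : Prop := ∀ (node_health : List (Int × List (Int × List (Int × Int)))) (time_max : Int), Dom_return_potention_recovery_date node_health time_max → Spec_return_potention_recovery_date node_health time_max (return_potention_recovery_date node_health time_max)

-- ===== LEMMAS AND PROOFS =====

-- inserting into an R-sorted list keeps it R-sorted
theorem rprd_pairwise_insertBy {α : Type} (R : α → α → Prop)
    (htrans : ∀ a b c, R a b → R b c → R a c) (before : α → α → Bool)
    (h1 : ∀ a b, before a b = true → R a b) (h2 : ∀ a b, before a b = false → R b a)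
    (x : α) (ys : List α) (hys : ys.Pairwise R) :
    (PySem.List.insertBy before x ys).Pairwise R := by
  induction ys with
  | nil => simp [PySem.List.insertBy]
  | cons y t ih =>
    rw [List.pairwise_cons] at hys
    rw [PySem.List.insertBy]
    by_cases hb : before x y = true
    · simp only [hb, if_true]
      refine List.Pairwise.cons ?_ (List.Pairwise.cons hys.1 hys.2)
      intro z hz
      rcases List.mem_cons.mp hz with rfl | hz
      · exact h1 _ _ hb
      · exact htrans _ _ _ (h1 _ _ hb) (hys.1 z hz)
    · simp only [hb]
      refine List.Pairwise.cons ?_ (ih hys.2)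
      intro z hz
      rcases (PySem.List.mem_insertBy _ _ _ _).mp hz with rfl | hz
      · exact h2 _ _ (by simpa using hb)
      · exact hys.1 z hz

theorem rprd_foldl_insertBy_pairwise {α : Type} (R : α → α → Prop)
    (htrans : ∀ a b c, R a b → R b c → R a c) (before : α → α → Bool)
    (h1 : ∀ a b, before a b = true → R a b) (h2 : ∀ a b, before a b = false → R b a) :
    ∀ (xs acc : List α), acc.Pairwise R →
      (xs.foldl (fun a x => PySem.List.insertBy before x a) acc).Pairwise R := by
  intro xs
  induction xs with
  | nil => intro acc h; simpa using h
  | cons x t ih =>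
    intro acc h
    exact ih _ (rprd_pairwise_insertBy R htrans before h1 h2 x acc h)

-- the stable lexicographic sort of the sick intervals is nondecreasing in the start day
theorem rprd_sorted2_pairwise_fst (xs : List (Int × Int)) :
    (PySem.List.sorted2 xs (fun h => h.1) (fun h => h.2)).Pairwise (fun a b => a.1 ≤ b.1) := by
  have := rprd_foldl_insertBy_pairwise (α := Int × Int) (fun a b => a.1 ≤ b.1)
    (fun a b c hab hbc => le_trans hab hbc)
    (fun a b => decide (a.1 < b.1) || (!decide (b.1 < a.1) && decide (a.2 < b.2)))
    (by intro a b h; simp at h; rcases h with h | h <;> omega)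
    (by intro a b h; simp at h; omega)
    xs [] (by simp)
  simpa [PySem.List.sorted2] using this

-- find-first over insertBy against the match A's min-with-key makes
theorem rprd_find?_insertBy (p : Int × Int → Bool) (x : Int × Int) (s : List (Int × Int))
    (hsort : s.Pairwise (fun a b => a.2 ≤ b.2)) :
    (PySem.List.insertBy (fun a b => decide (a.2 < b.2)) x s).find? p
      = match s.find? p with
        | none => if p x then some x else none
        | some m => if p x && decide (x.2 < m.2) then some x else some m := by
  induction s with
  | nil =>
    simp [PySem.List.insertBy, List.find?]
  | cons y t ih =>
    rw [List.pairwise_cons] at hsort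
    rw [PySem.List.insertBy]
    by_cases hxy : x.2 < y.2
    · rw [if_pos (by simpa using hxy)]
      cases hfind : List.find? p (y :: t) with
      | none =>
        rw [List.find?_cons]
        cases p x <;> simp [hfind]
      | some m =>
        have hm : m ∈ y :: t := List.mem_of_find?_eq_some hfind
        have hym : y.2 ≤ m.2 := by
          rcases List.mem_cons.mp hm with rfl | hm
          · exact le_refl _
          · exact hsort.1 m hm
        have hxm : x.2 < m.2 := lt_of_lt_of_le hxy hym
        rw [List.find?_cons]
        cases p x <;> simp [hfind, hxm]
    · rw [if_neg (by simpa using hxy)]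
      cases hpy : p y with
      | true =>
        simp [hpy, hxy]
      | false =>
        simp only [List.find?_cons, hpy]
        exact ih hsort.2

theorem rprd_min?_append_singleton (ys : List (Int × Int)) (x : Int × Int) :
    PySem.List.min? (ys ++ [x]) (fun h => h.2)
      = match PySem.List.min? ys (fun h => h.2) with
        | none => some x
        | some m => if x.2 < m.2 then some x else some m := by
  cases hys : PySem.List.min? ys (fun h => h.2) <;>
    simp_all [PySem.List.min?, List.foldl_append, List.foldl]

-- core: first end-qualifying element of the end-sorted list IS A's min(filter, key=end)
theorem rprd_core (p : Int × Int → Bool) (l : List (Int × Int)) :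
    (PySem.List.sorted l (fun h => h.2) false).find? p
      = PySem.List.min? (l.filter p) (fun h => h.2) := by
  induction l using List.reverseRecOn with
  | nil => simp [PySem.List.sorted, PySem.List.min?]
  | append_singleton l x ih =>
    have hsorted : PySem.List.sorted (l ++ [x]) (fun h => h.2) false
        = PySem.List.insertBy (fun a b => decide (a.2 < b.2)) x
            (PySem.List.sorted l (fun h => h.2) false) := by
      rw [PySem.List.sorted_eq_foldl_insertBy, List.foldl_append,
        ← PySem.List.sorted_eq_foldl_insertBy]
      rfl
    rw [hsorted, rprd_find?_insertBy p x _ (PySem.List.sorted_pairwise l (fun h => h.2)), ih]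
    rw [List.filter_append]
    cases hpx : p x with
    | true =>
      simp only [List.filter_cons, hpx, List.filter_nil, if_true]
      rw [rprd_min?_append_singleton]
      cases PySem.List.min? (l.filter p) (fun h => h.2) <;> simp
    | false =>
      simp only [List.filter_cons, hpx, List.filter_nil]
      cases h : PySem.List.min? (List.filter p l) (fun h => h.2) <;> simp [h]

-- the pointer loop lands on the first element of the suffix with end > t1
theorem rprd_advance_find (hs : List (Int × Int)) (t : Int) (ptr : Nat) :
    (if h : rprdAdvance hs t ptr < hs.length then some hs[rprdAdvance hs t ptr] else none)
      = (hs.drop ptr).find? (fun h => decide (t < h.2)) := by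
  fun_induction rprdAdvance hs t ptr with
  | case1 ptr h hle ih =>
    rw [List.drop_eq_getElem_cons h, List.find?_cons]
    simp only [show decide (t < hs[ptr].2) = false by simpa using not_lt.mpr hle]
    exact ih
  | case2 ptr h hle =>
    rw [List.drop_eq_getElem_cons h, List.find?_cons]
    simp only [show decide (t < hs[ptr].2) = true by simpa using not_le.mp hle]
    simp [h]
  | case3 ptr h =>
    rw [List.drop_eq_nil_of_le (by omega)]
    simp [h]

theorem rprd_advance_le (hs : List (Int × Int)) (t : Int) (ptr : Nat) (h : ptr ≤ hs.length) :
    rprdAdvance hs t ptr ≤ hs.length := by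
  fun_induction rprdAdvance hs t ptr with
  | case1 ptr h' hle ih => exact ih (by omega)
  | case2 ptr h' hle => omega
  | case3 ptr h' => omega

theorem rprd_advance_skip (hs : List (Int × Int)) (t : Int) (ptr : Nat) :
    ∀ i (hi : i < hs.length), ptr ≤ i → i < rprdAdvance hs t ptr → hs[i].2 ≤ t := by
  fun_induction rprdAdvance hs t ptr with
  | case1 ptr h hle ih =>
    intro i hi hpi hlt
    rcases Nat.eq_or_lt_of_le hpi with rfl | hgt
    · exact hle
    · exact ih i hi hgt hlt
  | case2 ptr h hle => intro i hi hpi hlt; omega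
  | case3 ptr h => intro i hi hpi hlt; omega

-- prefix elements failing the test do not change find?
theorem rprd_drop_find? {α : Type} (p : α → Bool) :
    ∀ (hs : List α) (ptr : Nat),
      (∀ i (hi : i < hs.length), i < ptr → p hs[i] = false) →
      (hs.drop ptr).find? p = hs.find? p := by
  intro hs
  induction hs with
  | nil => simp
  | cons y t ih =>
    intro ptr h
    cases ptr with
    | zero => simp
    | succ k =>
      have hy : p y = false := h 0 (by simp) (by omega)
      rw [List.drop_succ_cons, List.find?_cons, hy,
        ih k (fun i hi hik => h (i + 1) (by simpa using Nat.succ_lt_succ hi) (by omega))]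

-- per-node loop equivalence, with the pointer invariant
theorem rprd_node (node time_max : Int) (nd : PySem.Dict Int (List (Int × Int))) :
    ∀ (sick : List (Int × Int)) (acc : PySem.Dict (Int × Int × Int) Int) (ptr : Nat),
      sick.Pairwise (fun a b => a.1 ≤ b.1) →
      ptr ≤ (PySem.List.sorted (nd.getD 0 []) (fun h => h.2) false).length →
      (∀ t ∈ sick, ∀ i (hi : i < (PySem.List.sorted (nd.getD 0 []) (fun h => h.2) false).length),
          i < ptr → (PySem.List.sorted (nd.getD 0 []) (fun h => h.2) false)[i].2 ≤ t.1) →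
      (sick.foldl (fun st tt =>
          let p := rprdAdvance (PySem.List.sorted (nd.getD 0 []) (fun h => h.2) false) tt.1 st.1
          (p, st.2.insert (node, tt.1, tt.2)
            (if h : p < (PySem.List.sorted (nd.getD 0 []) (fun h => h.2) false).length
              then ((PySem.List.sorted (nd.getD 0 []) (fun h => h.2) false)[p]).1 else time_max)))
        (ptr, acc)).2
      = sick.foldl (fun acc2 tt =>
          let recovery_date :=
            if nd.contains 0 then
              let healthy_dates := (nd.getD 0 []).filter (fun h => decide (tt.1 < h.2))
              if healthy_dates.length > 0 then
                match PySem.List.min? healthy_dates (fun h => h.2) with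
                | some m => m.1
                | none => time_max
              else time_max
            else time_max
          acc2.insert (node, tt.1, tt.2) recovery_date) acc := by
  intro sick
  induction sick with
  | nil => intro acc ptr _ _ _; rfl
  | cons tt rest ih =>
    intro acc ptr hp hle hinv
    rw [List.pairwise_cons] at hp
    simp only [List.foldl_cons]
    set hs := PySem.List.sorted (nd.getD 0 []) (fun h => h.2) false with hhs
    set p : Int × Int → Bool := fun h => decide (tt.1 < h.2) with hpdef
    have h1 := rprd_advance_find hs tt.1 ptr
    have h2 : (hs.drop ptr).find? p = hs.find? p := by
      refine rprd_drop_find? p hs ptr ?_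
      intro i hi hip
      have := hinv tt (List.mem_cons_self) i hi hip
      simp [hpdef]
      omega
    have h3 : hs.find? p = PySem.List.min? ((nd.getD 0 []).filter p) (fun h => h.2) :=
      rprd_core p (nd.getD 0 [])
    have hv : (if h : rprdAdvance hs tt.1 ptr < hs.length then (hs[rprdAdvance hs tt.1 ptr]).1 else time_max)
        = (if nd.contains 0 then
            if ((nd.getD 0 []).filter p).length > 0 then
              match PySem.List.min? ((nd.getD 0 []).filter p) (fun h => h.2) with
              | some m => m.1
              | none => time_max
            else time_max
          else time_max) := by
      by_cases hc : nd.contains 0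
      · rw [if_pos hc]
        have hmain : (if h : rprdAdvance hs tt.1 ptr < hs.length then (hs[rprdAdvance hs tt.1 ptr]).1 else time_max)
            = (match PySem.List.min? ((nd.getD 0 []).filter p) (fun h => h.2) with
               | some m => m.1
               | none => time_max) := by
          rw [← h3, ← h2, ← h1]
          split <;> simp [*]
        rw [hmain]
        cases hmin : PySem.List.min? ((nd.getD 0 []).filter p) (fun h => h.2) with
        | none =>
          have : (nd.getD 0 []).filter p = [] := (PySem.List.min?_eq_none_iff _ _).mp hmin
          simp [this]
        | some m =>
          have hne : (nd.getD 0 []).filter p ≠ [] := by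
            intro hnil
            rw [hnil] at hmin
            simp [PySem.List.min?] at hmin
          have hlen : ((nd.getD 0 []).filter p).length > 0 := List.length_pos_iff.mpr hne
          simp [hlen]
      · have hnil : nd.getD 0 [] = [] :=
          PySem.Dict.getD_of_not_contains nd [] (by simpa using hc)
        rw [if_neg hc]
        have : hs = [] := by rw [hhs, hnil]; rfl
        simp [this]
    rw [hv]
    refine ih (acc.insert (node, tt.1, tt.2) _) (rprdAdvance hs tt.1 ptr) hp.2
      (rprd_advance_le hs tt.1 ptr hle) ?_
    intro t ht i hi hlt
    by_cases hip : i < ptr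
    · exact hinv t (List.mem_cons_of_mem _ ht) i hi hip
    · exact le_trans (rprd_advance_skip hs tt.1 ptr i hi (by omega) hlt) (hp.1 t ht)

-- ===== VERDICT (by name: the statement is the Claim_ definition above) =====
theorem return_potention_recovery_date_spec : Claim_equal_return_potention_recovery_date := by
  intro node_health time_max _hdom
  unfold Spec_return_potention_recovery_date
  unfold return_potention_recovery_date return_potention_recovery_date_alt
  simp only [rprdNodeLoop]
  congr 1
  congr 1
  refine PySem.List.foldl_congr_mem _ _ _ _ ?_
  intro acc node _
  exact (rprd_node node time_max _ _ acc 0 (rprd_sorted2_pairwise_fst _) (Nat.zero_le _)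
    (fun t _ i hi h0 => absurd h0 (by omega))).symm
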